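-- pv_equiv track=rewrite | github.com/frankbigshuai/ProgrammerRoadmap | app/models/response.py | _process_interest_preference
-- ===== SOURCE A (Python) =====
-- from typing import List, Dict, Optional
--
-- def _process_interest_preference(responses: List[Dict]) -> Dict:
--     """处理兴趣偏好数据"""
--     interest_scores = {"frontend": 0, "backend": 0, "mobile": 0, "data_science": 0}
--
--     for response in responses:
--         path_weights = response.get("path_weights", {})
--         for path, weight in path_weights.items():
--             if path in interest_scores:
--                 interest_scores[path] += weight
--
--     return interest_scores
-- ===== SOURCE B (Python) =====
-- from typing import List, Dict
--
-- def _process_interest_preference(responses: List[Dict]) -> Dict: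
--     """Processed transposed: one targeted scan of the responses per fixed category."""
--     return {
--         key: sum(response.get("path_weights", {}).get(key, 0) for response in responses)
--         for key in ("frontend", "backend", "mobile", "data_science")
--     }
-- ===== Notes on version B (the rewrite author's own statement) =====
-- stated objective: simpler
-- what changed: Replaces the mutable accumulator dict and the membership-guarded single pass over all path_weights items by a dict comprehension over the four fixed categories, each summing its own weight across the responses via get(key, 0) (loops transposed: outer over categories, inner over responses).
import Mathlib
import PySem

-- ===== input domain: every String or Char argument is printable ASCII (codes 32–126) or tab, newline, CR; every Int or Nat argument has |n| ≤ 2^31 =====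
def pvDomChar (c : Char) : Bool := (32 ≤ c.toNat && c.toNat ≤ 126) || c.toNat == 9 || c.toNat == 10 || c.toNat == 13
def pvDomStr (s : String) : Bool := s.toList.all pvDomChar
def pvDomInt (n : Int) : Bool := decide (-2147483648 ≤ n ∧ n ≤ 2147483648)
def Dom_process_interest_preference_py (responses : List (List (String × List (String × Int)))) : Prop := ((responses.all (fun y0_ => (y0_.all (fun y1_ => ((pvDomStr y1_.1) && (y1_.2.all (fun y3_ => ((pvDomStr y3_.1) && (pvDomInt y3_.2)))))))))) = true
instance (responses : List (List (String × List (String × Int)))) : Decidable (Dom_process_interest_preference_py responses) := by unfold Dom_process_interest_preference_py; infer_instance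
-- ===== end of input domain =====

-- B sums each of the four fixed categories by a targeted scan of the responses (loops transposed)
-- instead of A's membership-guarded single pass mutating an accumulator dict; equal return values proved.

-- ===== PORT A =====
def process_interest_preference_py (responses : List (List (String × List (String × Int)))) : List (String × Int) :=
  let interest_scores : PySem.Dict String Int :=
    PySem.Dict.mk [("frontend", 0), ("backend", 0), ("mobile", 0), ("data_science", 0)]
  let final := responses.foldl (fun interest_scores response =>
    let path_weights := (PySem.Dict.mk response).getD "path_weights" []
    path_weights.foldl (fun interest_scores pw =>
      if interest_scores.contains pw.1 then
        interest_scores.modify pw.1 0 (fun w => w + pw.2)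
      else interest_scores) interest_scores) interest_scores
  final.items

-- ===== PORT B =====
def process_interest_preference_py_alt (responses : List (List (String × List (String × Int)))) : List (String × Int) :=
  ["frontend", "backend", "mobile", "data_science"].map (fun key =>
    (key, (responses.map (fun response =>
      (PySem.Dict.mk ((PySem.Dict.mk response).getD "path_weights" [])).getD key 0)).sum))

-- ===== PRECONDITION & SPEC =====
-- Pre_ excludes inputs whose path_weights association list repeats a key: such a list encodes no
-- Python dict (dict keys are unique), so Python A never even receives those inputs.
def Pre_process_interest_preference_py (responses : List (List (String × List (String × Int)))) : Prop :=
  ∀ r ∈ responses, ((((PySem.Dict.mk r).getD "path_weights" []).map Prod.fst).Nodup)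
instance (responses : List (List (String × List (String × Int)))) : Decidable (Pre_process_interest_preference_py responses) := by unfold Pre_process_interest_preference_py; infer_instance

def pvWitness_process_interest_preference_py : (List (List (String × List (String × Int)))) :=
  [[("path_weights", [("frontend", 3), ("other", 1)])], [("path_weights", [("backend", -2)])]]

def Spec_process_interest_preference_py (responses : List (List (String × List (String × Int)))) (out : List (String × Int)) : Prop := out = process_interest_preference_py_alt responses
instance (responses : List (List (String × List (String × Int)))) (out : List (String × Int)) : Decidable (Spec_process_interest_preference_py responses out) := by unfold Spec_process_interest_preference_py; infer_instance

-- ===== CLAIM (what is proved, stated in full; the proofs are below) =====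
def Claim_equal_process_interest_preference_py : Prop := ∀ (responses : List (List (String × List (String × Int)))), Dom_process_interest_preference_py responses → Pre_process_interest_preference_py responses → Spec_process_interest_preference_py responses (process_interest_preference_py responses)

-- ===== LEMMAS AND PROOFS =====

-- the inner loop of A never changes which keys the accumulator dict contains
theorem pv_contains_inner (pw : List (String × Int)) (d : PySem.Dict String Int) (x : String) :
    ((pw.foldl (fun interest_scores pw =>
      if interest_scores.contains pw.1 then
        interest_scores.modify pw.1 0 (fun w => w + pw.2)
      else interest_scores) d).contains x) = d.contains x := by
  induction pw generalizing d with
  | nil => rfl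
  | cons p rest ih =>
    rw [List.foldl_cons, ih]
    by_cases h : d.contains p.1 = true
    · simp only [h, if_true, PySem.Dict.contains_modify]
      by_cases hx : x = p.1
      · simp [hx, h]
      · simp [hx]
    · simp [h]

-- value of the accumulator at a contained key after A's inner loop
theorem pv_getD_inner (pw : List (String × Int)) (d : PySem.Dict String Int)
    (hnd : (pw.map Prod.fst).Nodup) (k : String) (hc : d.contains k = true) :
    ((pw.foldl (fun interest_scores pw =>
      if interest_scores.contains pw.1 then
        interest_scores.modify pw.1 0 (fun w => w + pw.2)
      else interest_scores) d).getD k 0) = d.getD k 0 + (PySem.Dict.mk pw).getD k 0 := by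
  induction pw generalizing d with
  | nil => simp [PySem.Dict.getD_eq_get?_getD, PySem.Dict.get?]
  | cons p rest ih =>
    simp only [List.map_cons, List.nodup_cons] at hnd
    obtain ⟨hp, hrest⟩ := hnd
    rw [List.foldl_cons]
    have hmkcons : (PySem.Dict.mk (p :: rest)).getD k 0
        = if (p.1 == k) = true then p.2 else (PySem.Dict.mk rest).getD k 0 := by
      rw [PySem.Dict.getD_eq_get?_getD, PySem.Dict.get?_mk_cons]
      split
      · rfl
      · rw [PySem.Dict.getD_eq_get?_getD]
    by_cases h : d.contains p.1 = true
    · simp only [h, if_true]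
      rw [ih _ hrest (by rw [PySem.Dict.contains_modify]; simp [hc])]
      rw [PySem.Dict.getD_modify]
      by_cases hk : k = p.1
      · have h0 : (PySem.Dict.mk rest).getD k 0 = 0 := by
          apply PySem.Dict.getD_of_not_contains
          rw [PySem.Dict.contains_mk]
          simp only [List.any_eq_false]
          intro q hq hbq
          apply hp
          have hm : q.1 ∈ List.map Prod.fst rest := List.mem_map.mpr ⟨q, hq, rfl⟩
          rw [show q.1 = p.1 from by subst hk; exact beq_iff_eq.mp hbq] at hm
          exact hm
        rw [hmkcons, h0, if_pos hk, if_pos (by simp [hk] : ((p.1 == k) = true)), hk]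
        ring
      · rw [if_neg hk, hmkcons, if_neg (by simp only [beq_iff_eq]; exact fun he => hk he.symm)]
    · simp only [h, Bool.false_eq_true, if_false]
      have hk : k ≠ p.1 := fun he => h (he ▸ hc)
      rw [ih _ hrest hc, hmkcons, if_neg (by simp only [beq_iff_eq]; exact fun he => hk he.symm)]

-- value of the accumulator at a contained key after A's outer loop
theorem pv_getD_outer (rs : List (List (String × List (String × Int)))) (d : PySem.Dict String Int)
    (hpre : ∀ r ∈ rs, ((((PySem.Dict.mk r).getD "path_weights" []).map Prod.fst).Nodup))
    (k : String) (hc : d.contains k = true) :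
    ((rs.foldl (fun interest_scores response =>
      let path_weights := (PySem.Dict.mk response).getD "path_weights" []
      path_weights.foldl (fun interest_scores pw =>
        if interest_scores.contains pw.1 then
          interest_scores.modify pw.1 0 (fun w => w + pw.2)
        else interest_scores) interest_scores) d).getD k 0)
    = d.getD k 0 + (rs.map (fun response =>
        (PySem.Dict.mk ((PySem.Dict.mk response).getD "path_weights" [])).getD k 0)).sum := by
  induction rs generalizing d with
  | nil => simp
  | cons r rest ih =>
    rw [List.foldl_cons]
    have hc' : (((PySem.Dict.mk r).getD "path_weights" []).foldl (fun interest_scores pw =>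
        if interest_scores.contains pw.1 then
          interest_scores.modify pw.1 0 (fun w => w + pw.2)
        else interest_scores) d).contains k = true := by
      rw [pv_contains_inner]; exact hc
    rw [ih _ (fun r hr => hpre r (List.mem_cons_of_mem _ hr)) hc',
        pv_getD_inner _ _ (hpre r (List.mem_cons_self)) k hc]
    simp [add_assoc]

-- the inner loop preserves the key list
theorem pv_keys_inner (pw : List (String × Int)) (d : PySem.Dict String Int) :
    ((pw.foldl (fun interest_scores pw =>
      if interest_scores.contains pw.1 then
        interest_scores.modify pw.1 0 (fun w => w + pw.2)
      else interest_scores) d).keys) = d.keys := by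
  induction pw generalizing d with
  | nil => rfl
  | cons p rest ih =>
    rw [List.foldl_cons, ih]
    by_cases h : d.contains p.1 = true
    · rw [if_pos h, PySem.Dict.keys_modify, PySem.Dict.keys_insert_of_contains _ _ h]
    · simp [h]

-- the outer loop preserves the key list
theorem pv_keys_outer (rs : List (List (String × List (String × Int)))) (d : PySem.Dict String Int) :
    ((rs.foldl (fun interest_scores response =>
      let path_weights := (PySem.Dict.mk response).getD "path_weights" []
      path_weights.foldl (fun interest_scores pw =>
        if interest_scores.contains pw.1 then
          interest_scores.modify pw.1 0 (fun w => w + pw.2)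
        else interest_scores) interest_scores) d).keys) = d.keys := by
  induction rs generalizing d with
  | nil => rfl
  | cons r rest ih => rw [List.foldl_cons, ih, pv_keys_inner]



-- ===== VERDICT (by name: the statement is the Claim_ definition above) =====
theorem process_interest_preference_py_spec : Claim_equal_process_interest_preference_py := by
  intro responses _hdom hpre
  unfold Spec_process_interest_preference_py process_interest_preference_py process_interest_preference_py_alt
  set d0 : PySem.Dict String Int :=
    PySem.Dict.mk [("frontend", 0), ("backend", 0), ("mobile", 0), ("data_science", 0)] with hd0
  set dF := responses.foldl (fun interest_scores response =>
      let path_weights := (PySem.Dict.mk response).getD "path_weights" []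
      path_weights.foldl (fun interest_scores pw =>
        if interest_scores.contains pw.1 then
          interest_scores.modify pw.1 0 (fun w => w + pw.2)
        else interest_scores) interest_scores) d0 with hdF
  have hkeys : dF.keys = ["frontend", "backend", "mobile", "data_science"] := by
    rw [hdF, pv_keys_outer]; decide
  have hitems := PySem.Dict.items_eq_map_keys dF (by rw [hkeys]; decide) 0
  rw [hitems, hkeys]
  simp only [List.map_cons, List.map_nil]
  have hval : ∀ k : String, d0.contains k = true →
      dF.getD k 0 = d0.getD k 0 + (responses.map (fun response =>
        (PySem.Dict.mk ((PySem.Dict.mk response).getD "path_weights" [])).getD k 0)).sum := by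
    intro k hk
    rw [hdF]; exact pv_getD_outer responses d0 hpre k hk
  rw [hval "frontend" (by decide), hval "backend" (by decide),
      hval "mobile" (by decide), hval "data_science" (by decide)]
  norm_num [hd0, PySem.Dict.getD_eq_get?_getD, PySem.Dict.get?_mk_cons]
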